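-- pv_equiv track=rewrite | github.com/epilectrik/voynich | phases/RECOVERY_ARCHITECTURE_DECOMPOSITION/scripts/escape_strategy_decomposition.py | extract_recovery_zones
-- ===== SOURCE A (Python) =====
-- KERNEL_CLASSES = {1, 2, 3}
--
-- HAZARD_CLASSES = {7, 8, 9, 23, 30, 31}
--
-- def extract_recovery_zones(line_classes):
--     """Extract recovery zones: sequences between hazard token and next kernel token."""
--     zones = []
--     i = 0
--     while i < len(line_classes):
--         if line_classes[i] in HAZARD_CLASSES:
--             # Start collecting after hazard
--             zone = []
--             j = i + 1
--             while j < len(line_classes) and line_classes[j] not in KERNEL_CLASSES: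
--                 zone.append(line_classes[j])
--                 j += 1
--             if zone:  # Only non-empty zones
--                 zones.append(zone)
--             i = j + 1 if j < len(line_classes) else j
--         else:
--             i += 1
--     return zones
-- ===== SOURCE B (Python) =====
-- KERNEL_CLASSES = {1, 2, 3}
--
-- HAZARD_CLASSES = {7, 8, 9, 23, 30, 31}
--
-- def extract_recovery_zones(line_classes):
--     """Extract recovery zones: sequences between hazard token and next kernel token."""
--     zones = []
--     collecting = False
--     zone = []
--     for tok in line_classes:
--         if collecting:
--             if tok in KERNEL_CLASSES:
--                 if zone:
--                     zones.append(zone)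
--                 collecting = False
--                 zone = []
--             else:
--                 zone.append(tok)
--         elif tok in HAZARD_CLASSES:
--             collecting = True
--             zone = []
--     if collecting and zone:
--         zones.append(zone)
--     return zones
-- ===== Notes on version B (the rewrite author's own statement) =====
-- stated objective: simpler
-- what changed: Replaced the nested while-loops with index jumps by a single for-loop over the tokens maintaining a 'collecting' flag and the current zone, flushing it on the terminating kernel token or at end of input; one membership test per token instead of re-indexing.
import Mathlib
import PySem

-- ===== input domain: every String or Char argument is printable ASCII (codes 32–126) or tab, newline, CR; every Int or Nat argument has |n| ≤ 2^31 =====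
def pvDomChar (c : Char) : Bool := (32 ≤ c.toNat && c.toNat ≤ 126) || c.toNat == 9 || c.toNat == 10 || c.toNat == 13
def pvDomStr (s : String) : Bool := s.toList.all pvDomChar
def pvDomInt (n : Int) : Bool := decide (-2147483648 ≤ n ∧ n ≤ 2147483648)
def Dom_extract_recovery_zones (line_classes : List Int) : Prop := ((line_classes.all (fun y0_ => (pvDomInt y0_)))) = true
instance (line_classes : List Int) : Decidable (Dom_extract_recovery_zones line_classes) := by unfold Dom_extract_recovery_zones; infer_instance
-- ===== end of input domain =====

-- B replaces A's nested while-loops with index jumps by a single for-loop with a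
-- collecting flag and a current zone (objective: simpler); return values proved equal.

def kernelClasses : List Int := [1, 2, 3]
def hazardClasses : List Int := [7, 8, 9, 23, 30, 31]

-- ===== PORT A =====
-- A's inner while-loop from position j: collects tokens until a kernel token;
-- returns the collected zone and the remaining suffix AFTER the loop+jump
-- (i = j + 1 consumes the kernel token; at end of list nothing remains).
def innerA (xs : List Int) : List Int × List Int :=
  match xs with
  | [] => ([], [])
  | x :: t =>
    if x ∈ kernelClasses then ([], t)
    else
      let p := innerA t
      (x :: p.1, p.2)

theorem innerA_rest_le (xs : List Int) : (innerA xs).2.length ≤ xs.length := by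
  induction xs with
  | nil => simp [innerA]
  | cons x t ih =>
    simp only [innerA]
    split
    · simp
    · simpa using Nat.le_succ_of_le ih

-- A's outer while-loop, as recursion on the suffix starting at index i.
def extract_recovery_zones (line_classes : List Int) : List (List Int) :=
  match line_classes with
  | [] => []
  | x :: t =>
    if x ∈ hazardClasses then
      let p := innerA t
      (if p.1 ≠ [] then [p.1] else []) ++ extract_recovery_zones p.2
    else extract_recovery_zones t
termination_by line_classes.length
decreasing_by
  · exact Nat.lt_succ_of_le (innerA_rest_le t)
  · simp

-- ===== PORT B =====
-- one for-loop step over state (zones, collecting, zone)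
def stepB (s : List (List Int) × Bool × List Int) (tok : Int) :
    List (List Int) × Bool × List Int :=
  if s.2.1 then
    if tok ∈ kernelClasses then
      (s.1 ++ (if s.2.2 ≠ [] then [s.2.2] else []), false, [])
    else (s.1, true, s.2.2 ++ [tok])
  else if tok ∈ hazardClasses then (s.1, true, [])
  else s

def extract_recovery_zones_alt (line_classes : List Int) : List (List Int) :=
  let s := line_classes.foldl stepB ([], false, [])
  s.1 ++ (if s.2.1 ∧ s.2.2 ≠ [] then [s.2.2] else [])

-- ===== PRECONDITION & SPEC =====
def Spec_extract_recovery_zones (line_classes : List Int) (out : List (List Int)) : Prop := out = extract_recovery_zones_alt line_classes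
instance (line_classes : List Int) (out : List (List Int)) : Decidable (Spec_extract_recovery_zones line_classes out) := by unfold Spec_extract_recovery_zones; infer_instance

-- ===== CLAIM (what is proved, stated in full; the proofs are below) =====
def Claim_equal_extract_recovery_zones : Prop := ∀ (line_classes : List Int), Dom_extract_recovery_zones line_classes → Spec_extract_recovery_zones line_classes (extract_recovery_zones line_classes)

-- ===== LEMMAS AND PROOFS =====

def finishB (s : List (List Int) × Bool × List Int) : List (List Int) :=
  s.1 ++ (if s.2.1 ∧ s.2.2 ≠ [] then [s.2.2] else [])

-- joint loop invariant for the non-collecting and collecting states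
theorem fold_inv (xs : List Int) :
    (∀ zones : List (List Int),
       finishB (xs.foldl stepB (zones, false, [])) = zones ++ extract_recovery_zones xs) ∧
    (∀ (zones : List (List Int)) (zone : List Int),
       finishB (xs.foldl stepB (zones, true, zone)) =
         zones ++ (if zone ++ (innerA xs).1 ≠ [] then [zone ++ (innerA xs).1] else []) ++
           extract_recovery_zones (innerA xs).2) := by
  induction xs with
  | nil =>
    constructor
    · intro zones; simp [finishB, extract_recovery_zones]
    · intro zones zone; simp [finishB, innerA, extract_recovery_zones]
  | cons x t ih =>
    obtain ⟨ih1, ih2⟩ := ih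
    constructor
    · intro zones
      by_cases hx : x ∈ hazardClasses
      · have : stepB (zones, false, []) x = (zones, true, []) := by
          simp [stepB, hx]
        rw [List.foldl_cons, this, ih2]
        rw [extract_recovery_zones]
        simp [hx]
      · have : stepB (zones, false, []) x = (zones, false, []) := by
          simp [stepB, hx]
        rw [List.foldl_cons, this, ih1]
        rw [extract_recovery_zones]
        simp [hx]
    · intro zones zone
      by_cases hx : x ∈ kernelClasses
      · have : stepB (zones, true, zone) x =
            (zones ++ (if zone ≠ [] then [zone] else []), false, []) := by
          simp [stepB, hx]
        rw [List.foldl_cons, this, ih1]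
        simp [innerA, hx, List.append_assoc]
      · have : stepB (zones, true, zone) x = (zones, true, zone ++ [x]) := by
          simp [stepB, hx]
        rw [List.foldl_cons, this, ih2]
        simp [innerA, hx]

-- ===== VERDICT (by name: the statement is the Claim_ definition above) =====
theorem extract_recovery_zones_spec : Claim_equal_extract_recovery_zones := by
  intro xs _
  show extract_recovery_zones xs = extract_recovery_zones_alt xs
  have h := (fold_inv xs).1 []
  simpa [extract_recovery_zones_alt, finishB] using h.symm
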